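-- pv_equiv track=rewrite | github.com/abhijha910/ai-life-admin | backend/app/ai_engine/plan_generator.py | _calculate_priority_breakdown
-- ===== SOURCE A (Python) =====
-- from typing import List, Dict, Any, Optional
--
-- def _calculate_priority_breakdown(
--
--     tasks: List[Dict[str, Any]]
-- ) -> Dict[str, int]:
--     """Calculate priority breakdown"""
--     breakdown = {"high": 0, "medium": 0, "low": 0}
--
--     for task in tasks:
--         priority = task.get("priority", 50)
--         if priority >= 70:
--             breakdown["high"] += 1
--         elif priority >= 40:
--             breakdown["medium"] += 1
--         else:
--             breakdown["low"] += 1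
--
--     return breakdown
-- ===== SOURCE B (Python) =====
-- from typing import List, Dict, Any
--
-- def _calculate_priority_breakdown(tasks: List[Dict[str, Any]]) -> Dict[str, int]:
--     """Calculate priority breakdown"""
--     high = sum(1 for t in tasks if t.get("priority", 50) >= 70)
--     medium = sum(1 for t in tasks if 40 <= t.get("priority", 50) < 70)
--     low = sum(1 for t in tasks if t.get("priority", 50) < 40)
--     return {"high": high, "medium": medium, "low": low}
-- ===== Notes on version B (the rewrite author's own statement) =====
-- stated objective: simpler
-- what changed: Replaces the single mutating-dict accumulation loop with three independent threshold counts (one comprehension per bucket) assembled into a dict literal.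
import Mathlib
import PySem

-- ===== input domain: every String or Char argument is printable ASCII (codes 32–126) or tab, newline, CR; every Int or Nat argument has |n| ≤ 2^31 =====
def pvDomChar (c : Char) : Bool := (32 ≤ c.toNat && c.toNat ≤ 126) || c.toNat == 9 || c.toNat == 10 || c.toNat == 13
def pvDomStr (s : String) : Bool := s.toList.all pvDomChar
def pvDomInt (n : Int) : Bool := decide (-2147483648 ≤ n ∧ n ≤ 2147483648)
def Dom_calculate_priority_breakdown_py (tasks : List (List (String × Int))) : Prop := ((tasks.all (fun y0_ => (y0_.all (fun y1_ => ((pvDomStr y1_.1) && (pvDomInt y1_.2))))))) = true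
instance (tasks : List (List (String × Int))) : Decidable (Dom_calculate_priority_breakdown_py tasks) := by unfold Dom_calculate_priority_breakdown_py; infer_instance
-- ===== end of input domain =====

-- B replaces A's single mutating-dict accumulation loop with three independent
-- threshold counts assembled into a dict literal (objective: simpler).

-- ===== PORT A =====
-- one loop over tasks, incrementing the matching bucket of the dict in place
def calculate_priority_breakdown_py (tasks : List (List (String × Int))) : List (String × Int) :=
  (tasks.foldl
    (fun bd task =>
      let priority := (PySem.Dict.mk task).getD "priority" 50
      if priority ≥ 70 then bd.modify "high" 0 (· + 1)
      else if priority ≥ 40 then bd.modify "medium" 0 (· + 1)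
      else bd.modify "low" 0 (· + 1))
    (PySem.Dict.ofList [("high", 0), ("medium", 0), ("low", 0)])).items

-- ===== PORT B =====
-- three independent counts, one per bucket
def pvPriority (task : List (String × Int)) : Int :=
  (PySem.Dict.mk task).getD "priority" 50

def calculate_priority_breakdown_py_alt (tasks : List (List (String × Int))) : List (String × Int) :=
  [("high",   ((tasks.countP (fun t => 70 ≤ pvPriority t)) : Int)),
   ("medium", ((tasks.countP (fun t => 40 ≤ pvPriority t ∧ pvPriority t < 70)) : Int)),
   ("low",    ((tasks.countP (fun t => pvPriority t < 40)) : Int))]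

-- ===== PRECONDITION & SPEC =====
def Spec_calculate_priority_breakdown_py (tasks : List (List (String × Int))) (out : List (String × Int)) : Prop := out = calculate_priority_breakdown_py_alt tasks
instance (tasks : List (List (String × Int))) (out : List (String × Int)) : Decidable (Spec_calculate_priority_breakdown_py tasks out) := by unfold Spec_calculate_priority_breakdown_py; infer_instance

-- ===== CLAIM (what is proved, stated in full; the proofs are below) =====
def Claim_equal_calculate_priority_breakdown_py : Prop := ∀ (tasks : List (List (String × Int))), Dom_calculate_priority_breakdown_py tasks → Spec_calculate_priority_breakdown_py tasks (calculate_priority_breakdown_py tasks)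

-- ===== LEMMAS AND PROOFS =====

-- loop invariant: starting from any bucket values a b c, A's loop adds the three counts
lemma pv_loop_items (tasks : List (List (String × Int))) (a b c : Int) :
    (tasks.foldl
      (fun bd task =>
        let priority := (PySem.Dict.mk task).getD "priority" 50
        if priority ≥ 70 then bd.modify "high" 0 (· + 1)
        else if priority ≥ 40 then bd.modify "medium" 0 (· + 1)
        else bd.modify "low" 0 (· + 1))
      (PySem.Dict.mk [("high", a), ("medium", b), ("low", c)])).items =
    [("high",   a + (tasks.countP (fun t => 70 ≤ pvPriority t) : Int)),
     ("medium", b + (tasks.countP (fun t => 40 ≤ pvPriority t ∧ pvPriority t < 70) : Int)),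
     ("low",    c + (tasks.countP (fun t => pvPriority t < 40) : Int))] := by
  induction tasks generalizing a b c with
  | nil => simp
  | cons t ts ih =>
    simp only [List.foldl_cons, List.countP_cons]
    have hH : (PySem.Dict.mk [("high", a), ("medium", b), ("low", c)]).modify "high" 0 (· + 1)
        = PySem.Dict.mk [("high", a + 1), ("medium", b), ("low", c)] := by
      simp [PySem.Dict.modify, PySem.Dict.get?, PySem.Dict.insert, PySem.Dict.getD]
    have hM : (PySem.Dict.mk [("high", a), ("medium", b), ("low", c)]).modify "medium" 0 (· + 1)
        = PySem.Dict.mk [("high", a), ("medium", b + 1), ("low", c)] := by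
      simp [PySem.Dict.modify, PySem.Dict.get?, PySem.Dict.insert, PySem.Dict.getD]
    have hL : (PySem.Dict.mk [("high", a), ("medium", b), ("low", c)]).modify "low" 0 (· + 1)
        = PySem.Dict.mk [("high", a), ("medium", b), ("low", c + 1)] := by
      simp [PySem.Dict.modify, PySem.Dict.get?, PySem.Dict.insert, PySem.Dict.getD]
    by_cases h70 : (70 : Int) ≤ pvPriority t
    · simp only [pvPriority] at h70
      rw [if_pos h70, hH, ih]
      have e1 : decide (70 ≤ pvPriority t) = true := by simp [pvPriority]; omega
      have e2 : decide (40 ≤ pvPriority t ∧ pvPriority t < 70) = false := by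
        simp [pvPriority]; omega
      have e3 : decide (pvPriority t < 40) = false := by simp [pvPriority]; omega
      simp only [e1, e2, e3, if_true, Bool.false_eq_true, if_false,
        List.cons.injEq, Prod.mk.injEq, true_and, and_true]
      refine ⟨?_, ?_, ?_⟩ <;> push_cast <;> omega
    · by_cases h40 : (40 : Int) ≤ pvPriority t
      · simp only [pvPriority] at h70 h40
        rw [if_neg h70, if_pos h40, hM, ih]
        have e1 : decide (70 ≤ pvPriority t) = false := by simp [pvPriority]; omega
        have e2 : decide (40 ≤ pvPriority t ∧ pvPriority t < 70) = true := by
          simp [pvPriority]; omega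
        have e3 : decide (pvPriority t < 40) = false := by simp [pvPriority]; omega
        simp only [e1, e2, e3, if_true, Bool.false_eq_true, if_false,
          List.cons.injEq, Prod.mk.injEq, true_and, and_true]
        refine ⟨?_, ?_, ?_⟩ <;> push_cast <;> omega
      · simp only [pvPriority] at h70 h40
        rw [if_neg h70, if_neg h40, hL, ih]
        have e1 : decide (70 ≤ pvPriority t) = false := by simp [pvPriority]; omega
        have e2 : decide (40 ≤ pvPriority t ∧ pvPriority t < 70) = false := by
          simp [pvPriority]; omega
        have e3 : decide (pvPriority t < 40) = true := by simp [pvPriority]; omega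
        simp only [e1, e2, e3, if_true, Bool.false_eq_true, if_false,
          List.cons.injEq, Prod.mk.injEq, true_and, and_true]
        refine ⟨?_, ?_, ?_⟩ <;> push_cast <;> omega

-- ===== VERDICT (by name: the statement is the Claim_ definition above) =====
theorem calculate_priority_breakdown_py_spec : Claim_equal_calculate_priority_breakdown_py := by
  intro tasks _
  show _ = _
  unfold calculate_priority_breakdown_py calculate_priority_breakdown_py_alt
  rw [show PySem.Dict.ofList [("high", (0:Int)), ("medium", 0), ("low", 0)]
      = PySem.Dict.mk [("high", 0), ("medium", 0), ("low", 0)] from by decide]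
  rw [pv_loop_items]
  simp
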